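-- pv_equiv track=rewrite | github.com/Abdoug/freecodecamp-challenges | Python/Projects/Budget App/budget.py | getFormattedLines
-- ===== SOURCE A (Python) =====
-- def getFormattedLines (array):
--   lines = ""
--   lastElement = ""
--
--   for index, item in enumerate(array):
--     # Check if we're in the first of new line
--     if (index == 0 or lastElement == "\n"):
--       lines += "     "
--
--     # Check if we're in the end of line
--     if (item == "\n"):
--       lines += item
--     else:
--       lines += item + "  "
--
--     lastElement = item
--
--   return lines
-- ===== SOURCE B (Python) =====
-- def getFormattedLines(array):
--     out = []
--     i = 0
--     n = len(array)
--     while i < n: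
--         out.append("     ")
--         while i < n:
--             item = array[i]
--             i += 1
--             if item == "\n":
--                 out.append("\n")
--                 break
--             out.append(item + "  ")
--     return "".join(out)
-- ===== Notes on version B (the rewrite author's own statement) =====
-- stated objective: alternative
-- what changed: Replaced the single flat enumerate pass with a lastElement flag by explicit per-line grouping: an outer loop that emits the indent once per logical line and an inner index loop that consumes tokens until a newline, collecting pieces in a list joined once at the end.
import Mathlib
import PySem

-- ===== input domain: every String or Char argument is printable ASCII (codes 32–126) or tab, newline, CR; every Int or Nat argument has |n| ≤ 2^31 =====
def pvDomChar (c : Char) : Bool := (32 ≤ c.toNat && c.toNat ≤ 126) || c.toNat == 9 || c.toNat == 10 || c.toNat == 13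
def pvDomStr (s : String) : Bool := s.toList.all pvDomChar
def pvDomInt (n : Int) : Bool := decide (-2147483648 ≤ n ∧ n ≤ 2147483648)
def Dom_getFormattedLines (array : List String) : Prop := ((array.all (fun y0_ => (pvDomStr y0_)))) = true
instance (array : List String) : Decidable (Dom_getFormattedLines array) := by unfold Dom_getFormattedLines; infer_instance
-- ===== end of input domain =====

-- B restructures A's flat enumerate pass (with a lastElement flag deciding where indents go)
-- into explicit per-line grouping: an outer loop emitting one indent per logical line and an
-- inner loop consuming tokens up to a newline; objective: alternative decomposition, not speed.

-- ===== PORT A =====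
-- A-side helper: the body of A's single for-loop over enumerate(array), state = (lines, lastElement)
def pvStepA (st : String × String) (p : Int × String) : String × String :=
  let lines := if p.1 == 0 || st.2 == "\n" then st.1 ++ "     " else st.1
  let lines := if p.2 == "\n" then lines ++ p.2 else lines ++ p.2 ++ "  "
  (lines, p.2)

def getFormattedLines (array : List String) : String :=
  ((PySem.List.enumerate array).foldl pvStepA ("", "")).1

-- ===== PORT B =====
-- B-side helper: the inner while-loop — consume tokens of one line, return (pieces of this line joined, rest)
def pvLineB : List String → String × List String
  | [] => ("", [])
  | item :: rest =>
    if item == "\n" then ("\n", rest)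
    else
      let p := pvLineB rest
      ((item ++ "  ") ++ p.1, p.2)

theorem pvLineB_rest_length : ∀ (l : List String), (pvLineB l).2.length ≤ l.length := by
  intro l
  induction l with
  | nil => simp [pvLineB]
  | cons item rest ih =>
    simp only [pvLineB]
    split
    · simp
    · simpa using Nat.le_succ_of_le ih

-- the outer while-loop: one indent per logical line
def getFormattedLines_alt : List String → String
  | [] => ""
  | item :: rest =>
    let p := pvLineB (item :: rest)
    "     " ++ p.1 ++ getFormattedLines_alt p.2
termination_by l => l.length
decreasing_by
  simp only [pvLineB]
  split
  · simp
  · exact Nat.lt_succ_of_le (pvLineB_rest_length rest)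

-- ===== PRECONDITION & SPEC =====
def Spec_getFormattedLines (array : List String) (out : String) : Prop := out = getFormattedLines_alt array
instance (array : List String) (out : String) : Decidable (Spec_getFormattedLines array out) := by unfold Spec_getFormattedLines; infer_instance

-- ===== CLAIM (what is proved, stated in full; the proofs are below) =====
def Claim_equal_getFormattedLines : Prop := ∀ (array : List String), Dom_getFormattedLines array → Spec_getFormattedLines array (getFormattedLines array)

-- ===== LEMMAS AND PROOFS =====

-- the "mid-line" continuation: finish the current line, then format the remaining lines
def pvMidB (l : List String) : String := (pvLineB l).1 ++ getFormattedLines_alt (pvLineB l).2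

theorem pvKey : ∀ (l : List String) (i : Int) (acc last : String), 0 ≤ i →
    ((PySem.List.enumerate l i).foldl pvStepA (acc, last)).1 =
      acc ++ (if i == 0 || last == "\n" then getFormattedLines_alt l else pvMidB l) := by
  intro l
  induction l with
  | nil =>
    intro i acc last _
    simp [PySem.List.enumerate_nil, pvMidB, pvLineB, getFormattedLines_alt]
  | cons item rest ih =>
    intro i acc last hi
    rw [PySem.List.enumerate_cons, List.foldl_cons,
      show pvStepA (acc, last) (i, item) =
        ((if i == 0 || last == "\n" then acc ++ "     " else acc) ++
          (if item == "\n" then item else item ++ "  "), item) from by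
        simp only [pvStepA]; split <;> split <;> simp [← String.append_assoc],
      ih (i + 1) _ item (by omega)]
    have h1 : ((i + 1 : Int) == 0) = false := by simp; omega
    rw [h1, Bool.false_or]
    by_cases hit : item = "\n"
    · subst hit
      have hr1 : getFormattedLines_alt ("\n" :: rest) = "     " ++ ("\n" ++ getFormattedLines_alt rest) := by
        simp [getFormattedLines_alt, pvLineB, ← String.append_assoc]
      have hr2 : pvMidB ("\n" :: rest) = "\n" ++ getFormattedLines_alt rest := by
        simp [pvMidB, pvLineB]
      by_cases hc : (i == 0 || last == "\n") = true
      · simp [hc, hr1, ← String.append_assoc]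
        all_goals simp [String.append_assoc]
      · simp only [hc]
        simp [hr2, ← String.append_assoc]
    · have hit' : (item == "\n") = false := by simp [hit]
      have hr1 : getFormattedLines_alt (item :: rest) = "     " ++ ((item ++ "  ") ++ pvMidB rest) := by
        simp [getFormattedLines_alt, pvLineB, hit', pvMidB]
        simp [String.append_assoc]
      have hr2 : pvMidB (item :: rest) = (item ++ "  ") ++ pvMidB rest := by
        simp [pvMidB, pvLineB, hit']
        simp [String.append_assoc]
      by_cases hc : (i == 0 || last == "\n") = true
      · simp [hit', hc, hr1, ← String.append_assoc]
        all_goals simp [String.append_assoc]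
      · simp only [hit', hc]
        simp [hr2, ← String.append_assoc]

-- ===== VERDICT (by name: the statement is the Claim_ definition above) =====
theorem getFormattedLines_spec : Claim_equal_getFormattedLines := by
  intro array _
  unfold Spec_getFormattedLines getFormattedLines
  rw [pvKey array 0 "" "" le_rfl]
  simp
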